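-- pv_equiv track=rewrite | github.com/vatsalmavani/grokking | 11 Subsets/02 Subsets II.py | subsets_dfs
-- ===== SOURCE A (Python) =====
-- def subsets_dfs(nums):
--     res = []
--     def dfs(nums, res, cur, pos):
--         res.append(cur)
--         for i in range(pos, len(nums)):
--             if i > pos and nums[i] == nums[i-1]:
--                 continue
--             dfs(nums, res, cur + [nums[i]], i + 1)
--     dfs(nums, res, [], 0)
--     return res
-- ===== SOURCE B (Python) =====
-- def subsets_dfs(nums):
--     res = []
--     stack = [([], 0)]
--     while stack:
--         cur, pos = stack.pop()
--         res.append(cur)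
--         children = []
--         for i in range(pos, len(nums)):
--             if i > pos and nums[i] == nums[i-1]:
--                 continue
--             children.append((cur + [nums[i]], i + 1))
--         stack.extend(reversed(children))
--     return res
-- ===== Notes on version B (the rewrite author's own statement) =====
-- stated objective: alternative
-- what changed: Replaced the recursive DFS (mutating a shared res list) with an iterative explicit stack of (cur, pos) frames, popping frames and pushing child frames in reversed order to reproduce the exact preorder output.
import Mathlib
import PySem

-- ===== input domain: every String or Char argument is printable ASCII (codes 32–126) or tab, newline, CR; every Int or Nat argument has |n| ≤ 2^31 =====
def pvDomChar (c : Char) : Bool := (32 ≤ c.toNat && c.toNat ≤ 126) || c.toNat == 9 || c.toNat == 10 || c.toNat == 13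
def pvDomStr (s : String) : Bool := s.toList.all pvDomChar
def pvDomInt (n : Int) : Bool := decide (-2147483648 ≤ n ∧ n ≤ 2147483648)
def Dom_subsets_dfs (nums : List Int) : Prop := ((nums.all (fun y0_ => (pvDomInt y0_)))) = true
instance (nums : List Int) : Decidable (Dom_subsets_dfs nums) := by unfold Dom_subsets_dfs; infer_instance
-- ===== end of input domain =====

-- B replaces A's recursive DFS by an explicit stack of (cur, pos) frames popped in preorder (objective: alternative decomposition, same cost).

-- ===== PORT A =====
-- res is threaded as an accumulator, the loop body is the mutual helper; indices are
-- always in range, so List.getD i 0 equals Python's nums[i] here.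
mutual
def pvDfsA (nums : List Int) (res : List (List Int)) (cur : List Int) (pos : Nat) :
    List (List Int) :=
  pvDfsALoop nums (res ++ [cur]) cur pos pos (le_refl pos)
termination_by (nums.length + 1 - pos, nums.length + 1)

def pvDfsALoop (nums : List Int) (res : List (List Int)) (cur : List Int) (pos i : Nat)
    (hpi : pos ≤ i) : List (List Int) :=
  if h : i < nums.length then
    if i > pos ∧ nums.getD i 0 = nums.getD (i-1) 0 then
      pvDfsALoop nums res cur pos (i+1) (by omega)
    else
      pvDfsALoop nums (pvDfsA nums res (cur ++ [nums.getD i 0]) (i+1)) cur pos (i+1) (by omega)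
  else res
termination_by (nums.length + 1 - pos, nums.length - i)
end

def subsets_dfs (nums : List Int) : List (List Int) :=
  pvDfsA nums [] [] 0

-- ===== PORT B =====
-- the inner for-loop collecting child frames
def pvChildren (nums : List Int) (cur : List Int) (pos i : Nat) :
    List (List Int × Nat) :=
  if h : i < nums.length then
    if i > pos ∧ nums.getD i 0 = nums.getD (i-1) 0 then
      pvChildren nums cur pos (i+1)
    else
      (cur ++ [nums.getD i 0], i + 1) :: pvChildren nums cur pos (i+1)
  else []
termination_by nums.length - i

def pvStackMeasure (nums : List Int) (stack : List (List Int × Nat)) : Nat :=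
  (stack.map (fun f => 3 ^ (nums.length + 1 - f.2))).sum

theorem pvChildren_measure (nums : List Int) (cur : List Int) (pos i : Nat) :
    pvStackMeasure nums (pvChildren nums cur pos i) < 3 ^ (nums.length + 1 - i) := by
  unfold pvChildren
  split
  · rename_i h
    split
    · have := pvChildren_measure nums cur pos (i+1)
      calc pvStackMeasure nums (pvChildren nums cur pos (i+1))
          < 3 ^ (nums.length + 1 - (i+1)) := this
        _ ≤ 3 ^ (nums.length + 1 - i) := Nat.pow_le_pow_right (by norm_num) (by omega)
    · have ih := pvChildren_measure nums cur pos (i+1)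
      have hk : nums.length + 1 - (i+1) = nums.length - i := by omega
      simp only [pvStackMeasure, List.map_cons, List.sum_cons] at *
      have h1 : nums.length + 1 - i = (nums.length - i) + 1 := by omega
      rw [hk] at ih ⊢
      rw [h1, pow_succ]
      omega
  · simp [pvStackMeasure]
termination_by nums.length - i

-- the while loop; the stack is represented head-as-top (Python pops/extends at
-- the list's end; reversing the representation, extend(reversed(children))
-- becomes prepending children in order)
def pvAltLoop (nums : List Int) (stack : List (List Int × Nat)) (res : List (List Int)) :
    List (List Int) :=
  match stack with
  | [] => res
  | (cur, pos) :: rest =>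
      pvAltLoop nums (pvChildren nums cur pos pos ++ rest) (res ++ [cur])
termination_by pvStackMeasure nums stack
decreasing_by
  simp only [pvStackMeasure, List.map_append, List.sum_append, List.map_cons, List.sum_cons]
  have := pvChildren_measure nums cur pos pos
  simp only [pvStackMeasure] at this
  omega

def subsets_dfs_alt (nums : List Int) : List (List Int) :=
  pvAltLoop nums [([], 0)] []

-- ===== PRECONDITION & SPEC =====
def Spec_subsets_dfs (nums : List Int) (out : List (List Int)) : Prop := out = subsets_dfs_alt nums
instance (nums : List Int) (out : List (List Int)) : Decidable (Spec_subsets_dfs nums out) := by unfold Spec_subsets_dfs; infer_instance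

-- ===== CLAIM (what is proved, stated in full; the proofs are below) =====
def Claim_equal_subsets_dfs : Prop := ∀ (nums : List Int), Dom_subsets_dfs nums → Spec_subsets_dfs nums (subsets_dfs nums)

-- ===== LEMMAS AND PROOFS =====

-- A's dfs only appends to res
mutual
theorem pvDfsA_append (nums : List Int) (res : List (List Int)) (cur : List Int) (pos : Nat) :
    pvDfsA nums res cur pos = res ++ pvDfsA nums [] cur pos := by
  rw [pvDfsA.eq_def nums res cur pos, pvDfsA.eq_def nums [] cur pos,
      pvDfsALoop_append nums (res ++ [cur]), pvDfsALoop_append nums ([] ++ [cur])]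
  simp
termination_by (nums.length + 1 - pos, nums.length + 1)

theorem pvDfsALoop_append (nums : List Int) (res : List (List Int)) (cur : List Int)
    (pos i : Nat) (hpi : pos ≤ i) :
    pvDfsALoop nums res cur pos i hpi = res ++ pvDfsALoop nums [] cur pos i hpi := by
  rw [pvDfsALoop.eq_def nums res cur pos i hpi, pvDfsALoop.eq_def nums [] cur pos i hpi]
  split
  · rename_i h
    split
    · exact pvDfsALoop_append nums res cur pos (i+1) (by omega)
    · rw [pvDfsALoop_append nums (pvDfsA nums res (cur ++ [nums.getD i 0]) (i+1)),
          pvDfsALoop_append nums (pvDfsA nums [] (cur ++ [nums.getD i 0]) (i+1)),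
          pvDfsA_append nums res]
      simp
  · simp
termination_by (nums.length + 1 - pos, nums.length - i)
end

-- A's loop produces exactly the concatenation of the DFS outputs of B's child frames
theorem pvDfsALoop_eq_children (nums : List Int) (res : List (List Int)) (cur : List Int)
    (pos i : Nat) (hpi : pos ≤ i) :
    pvDfsALoop nums res cur pos i hpi =
      res ++ (pvChildren nums cur pos i).flatMap (fun f => pvDfsA nums [] f.1 f.2) := by
  rw [pvDfsALoop.eq_def, pvChildren.eq_def]
  split
  · rename_i h
    split
    · exact pvDfsALoop_eq_children nums res cur pos (i+1) (by omega)
    · rw [pvDfsALoop_eq_children nums _ cur pos (i+1) (by omega), pvDfsA_append nums res]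
      simp
  · simp
termination_by nums.length - i

theorem pvDfsA_eq (nums : List Int) (cur : List Int) (pos : Nat) :
    pvDfsA nums [] cur pos =
      cur :: (pvChildren nums cur pos pos).flatMap (fun f => pvDfsA nums [] f.1 f.2) := by
  rw [pvDfsA.eq_def, pvDfsALoop_eq_children]
  simp

theorem pvAltLoop_eq (nums : List Int) (stack : List (List Int × Nat))
    (res : List (List Int)) :
    pvAltLoop nums stack res =
      res ++ stack.flatMap (fun f => pvDfsA nums [] f.1 f.2) := by
  match stack with
  | [] => simp [pvAltLoop]
  | (cur, pos) :: rest =>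
    rw [pvAltLoop, pvAltLoop_eq nums (pvChildren nums cur pos pos ++ rest)]
    rw [List.flatMap_cons, pvDfsA_eq]
    simp
termination_by pvStackMeasure nums stack
decreasing_by
  simp only [pvStackMeasure, List.map_append, List.sum_append, List.map_cons, List.sum_cons]
  have := pvChildren_measure nums cur pos pos
  simp only [pvStackMeasure] at this
  omega

-- ===== VERDICT (by name: the statement is the Claim_ definition above) =====
theorem subsets_dfs_spec : Claim_equal_subsets_dfs := by
  intro nums _
  unfold Spec_subsets_dfs subsets_dfs subsets_dfs_alt
  rw [pvAltLoop_eq]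
  simp
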